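-- pv_equiv track=rewrite | github.com/globusgenomics/galaxy | lib/galaxy/webapps/galaxy/controllers/workflow.py | _extend_with_multiplied_combos
-- ===== SOURCE A (Python) =====
-- def _extend_with_multiplied_combos(input_combos, multi_inputs):
--     combos = input_combos
--
--     for multi_input_key, multi_input_value in multi_inputs.items():
--         iter_combos = []
--
--         for combo in combos:
--             for input_value in multi_input_value:
--                 iter_combos.append(_copy_and_extend_inputs(combo, multi_input_key, input_value))
--
--         combos = iter_combos
--     return combos
--
-- def _copy_and_extend_inputs(inputs, key, value):
--     new_inputs = dict(inputs)
--     new_inputs[key] = value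
--     return new_inputs
-- ===== SOURCE B (Python) =====
-- def _extend_with_multiplied_combos(input_combos, multi_inputs):
--     keys = list(multi_inputs)
--     value_lists = list(multi_inputs.values())
--     result = []
--     for combo in input_combos:
--         for values in _value_product(value_lists):
--             new = dict(combo)
--             new.update(zip(keys, values))
--             result.append(new)
--     return result
--
-- def _value_product(lists):
--     if not lists:
--         yield ()
--         return
--     for v in lists[0]:
--         for tail in _value_product(lists[1:]):
--             yield (v,) + tail
-- ===== Notes on version B (the rewrite author's own statement) =====
-- stated objective: idiomatic
-- what changed: B enumerates the Cartesian product of the value lists once (recursive generator) and builds each output dict directly from a base combo plus one zip(keys, values) update, instead of A's per-key rebuild of the whole combo list with a fresh dict copy at every key level.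
import Mathlib
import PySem

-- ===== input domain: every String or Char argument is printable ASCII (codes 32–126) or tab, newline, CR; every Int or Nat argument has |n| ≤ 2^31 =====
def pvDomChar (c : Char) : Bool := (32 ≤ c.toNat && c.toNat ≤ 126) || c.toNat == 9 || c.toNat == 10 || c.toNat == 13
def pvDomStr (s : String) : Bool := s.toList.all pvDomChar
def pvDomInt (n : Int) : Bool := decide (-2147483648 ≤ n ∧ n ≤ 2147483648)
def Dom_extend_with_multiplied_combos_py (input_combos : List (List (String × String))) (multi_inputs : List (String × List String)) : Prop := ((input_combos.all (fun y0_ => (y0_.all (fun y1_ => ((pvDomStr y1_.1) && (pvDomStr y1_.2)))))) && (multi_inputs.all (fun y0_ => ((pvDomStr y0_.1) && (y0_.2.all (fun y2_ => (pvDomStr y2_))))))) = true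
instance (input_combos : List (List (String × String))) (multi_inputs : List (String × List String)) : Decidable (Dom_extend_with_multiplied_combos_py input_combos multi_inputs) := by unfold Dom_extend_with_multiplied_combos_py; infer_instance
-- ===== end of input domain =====

-- B replaces A's per-key rebuild of the combo list by one direct enumeration of the
-- Cartesian product of the value lists (idiomatic, single pass; same asymptotic cost).

-- ===== PORT A =====
-- _copy_and_extend_inputs: new = dict(inputs); new[key] = value; return new
def pyCopyAndExtendInputs (inputs : List (String × String)) (key : String) (value : String) : List (String × String) :=
  ((PySem.Dict.ofList inputs).insert key value).items

def extend_with_multiplied_combos_py (input_combos : List (List (String × String))) (multi_inputs : List (String × List String)) : List (List (String × String)) :=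
  -- for multi_input_key, multi_input_value in multi_inputs.items(): … combos = iter_combos
  multi_inputs.foldl
    (fun combos kv =>
      -- iter_combos = []; for combo in combos: for input_value in kv.2: iter_combos.append(…)
      combos.foldl
        (fun iter_combos combo =>
          kv.2.foldl (fun iter_combos input_value => iter_combos ++ [pyCopyAndExtendInputs combo kv.1 input_value]) iter_combos)
        [])
    input_combos

-- ===== PORT B =====
-- _value_product: recursive generator of the Cartesian product of the value lists
def valueProduct : List (List String) → List (List String)
  | [] => [[]]
  | vs :: rest => vs.flatMap (fun v => (valueProduct rest).map (fun t => v :: t))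

def extend_with_multiplied_combos_py_alt (input_combos : List (List (String × String))) (multi_inputs : List (String × List String)) : List (List (String × String)) :=
  let keys := multi_inputs.map Prod.fst
  let valueLists := multi_inputs.map Prod.snd
  input_combos.flatMap (fun combo =>
    (valueProduct valueLists).map (fun values =>
      -- new = dict(combo); new.update(zip(keys, values))
      ((PySem.Dict.ofList combo).update (keys.zip values)).items))

-- ===== PRECONDITION & SPEC =====
-- Pre_ restricts the arguments to genuine dict representations: association lists with
-- pairwise-distinct keys — the only lists that denote a Python dict under the type
-- convention (a duplicate-keyed list corresponds to no Python input at all).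
def Pre_extend_with_multiplied_combos_py (input_combos : List (List (String × String))) (multi_inputs : List (String × List String)) : Prop :=
  (∀ c ∈ input_combos, (c.map Prod.fst).Nodup) ∧ (multi_inputs.map Prod.fst).Nodup
instance (input_combos : List (List (String × String))) (multi_inputs : List (String × List String)) : Decidable (Pre_extend_with_multiplied_combos_py input_combos multi_inputs) := by unfold Pre_extend_with_multiplied_combos_py; infer_instance

def pvWitness_extend_with_multiplied_combos_py : (List (List (String × String))) × (List (String × List String)) :=
  ([[("a", "1")], [("a", "2"), ("b", "3")]], [("k", ["x", "y"]), ("a", ["z"])])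

def Spec_extend_with_multiplied_combos_py (input_combos : List (List (String × String))) (multi_inputs : List (String × List String)) (out : List (List (String × String))) : Prop := out = extend_with_multiplied_combos_py_alt input_combos multi_inputs
instance (input_combos : List (List (String × String))) (multi_inputs : List (String × List String)) (out : List (List (String × String))) : Decidable (Spec_extend_with_multiplied_combos_py input_combos multi_inputs out) := by unfold Spec_extend_with_multiplied_combos_py; infer_instance

-- ===== CLAIM (what is proved, stated in full; the proofs are below) =====
def Claim_equal_extend_with_multiplied_combos_py : Prop := ∀ (input_combos : List (List (String × String))) (multi_inputs : List (String × List String)), Dom_extend_with_multiplied_combos_py input_combos multi_inputs → Pre_extend_with_multiplied_combos_py input_combos multi_inputs → Spec_extend_with_multiplied_combos_py input_combos multi_inputs (extend_with_multiplied_combos_py input_combos multi_inputs)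

-- ===== LEMMAS AND PROOFS =====

-- A nodup-keyed association list already is the dict it denotes.
theorem ofList_of_nodup (l : List (String × String)) (h : (l.map Prod.fst).Nodup) :
    PySem.Dict.ofList l = PySem.Dict.mk l := by
  apply PySem.Dict.ext
  show (List.foldl (fun acc p => acc.insert p.1 p.2) PySem.Dict.empty l).items = l
  have := PySem.Dict.items_foldl_insert_fresh (l := l) (k := Prod.fst) (v := Prod.snd)
    (d := (PySem.Dict.empty : PySem.Dict String String))
    (by intro a _; simp [PySem.Dict.contains_empty]) h
  simpa using this

def stepA (kv : String × List String) (c : List (String × String)) : List (List (String × String)) :=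
  kv.2.map (fun v => pyCopyAndExtendInputs c kv.1 v)

-- A's two inner loops are one flatMap.
theorem inner_loops_eq (kv : String × List String) (combos : List (List (String × String))) :
    combos.foldl
      (fun iter_combos combo =>
        kv.2.foldl (fun iter_combos input_value => iter_combos ++ [pyCopyAndExtendInputs combo kv.1 input_value]) iter_combos)
      []
    = combos.flatMap (stepA kv) := by
  simp only [PySem.List.foldl_append_singleton_eq_map]
  simpa [stepA] using PySem.List.foldl_append_eq_flatMap (l := combos)
    (g := fun combo => kv.2.map (fun v => pyCopyAndExtendInputs combo kv.1 v)) (acc := [])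

-- The outer fold of flatMaps distributes over its starting list.
theorem fold_flatMap_distrib (items : List (String × List String))
    (cs : List (List (String × String))) :
    items.foldl (fun combos kv => combos.flatMap (stepA kv)) cs
    = cs.flatMap (fun c => items.foldl (fun combos kv => combos.flatMap (stepA kv)) [c]) := by
  induction items generalizing cs with
  | nil => simp
  | cons kv rest ih =>
      simp only [List.foldl_cons]
      rw [ih, List.flatMap_assoc]
      apply List.flatMap_congr
      intro c _
      simp only [List.flatMap_cons, List.flatMap_nil, List.append_nil]
      rw [ih]

-- Per base dict: the sequential key-by-key expansion equals the product enumeration.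
theorem per_dict_eq (items : List (String × List String)) (d : PySem.Dict String String)
    (hd : d.keys.Nodup) :
    items.foldl (fun combos kv => combos.flatMap (stepA kv)) [d.items]
    = (valueProduct (items.map Prod.snd)).map
        (fun values => (((items.map Prod.fst).zip values).foldl (fun nd kv => nd.insert kv.1 kv.2) d).items) := by
  induction items generalizing d with
  | nil => simp [valueProduct]
  | cons kv rest ih =>
      obtain ⟨k, vs⟩ := kv
      have hof : PySem.Dict.ofList d.items = d := by
        rw [ofList_of_nodup d.items hd]
      simp only [List.foldl_cons, List.flatMap_cons, List.flatMap_nil, List.append_nil]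
      rw [fold_flatMap_distrib]
      simp only [stepA, pyCopyAndExtendInputs, hof, List.flatMap_map]
      have hins : ∀ v : String, (d.insert k v).keys.Nodup := fun v => PySem.Dict.nodup_keys_insert d k v hd
      calc vs.flatMap (fun v => rest.foldl (fun combos kv => combos.flatMap (stepA kv)) [(d.insert k v).items])
          = vs.flatMap (fun v => (valueProduct (rest.map Prod.snd)).map
              (fun values => (((rest.map Prod.fst).zip values).foldl (fun nd kv => nd.insert kv.1 kv.2) (d.insert k v)).items)) := by
            apply List.flatMap_congr; intro v _
            exact ih (d.insert k v) (hins v)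
        _ = _ := by
            simp [valueProduct, List.map_flatMap, Function.comp_def]

-- ===== VERDICT (by name: the statement is the Claim_ definition above) =====
theorem extend_with_multiplied_combos_py_spec : Claim_equal_extend_with_multiplied_combos_py := by
  intro input_combos multi_inputs _ hpre
  obtain ⟨hic, hmi⟩ := hpre
  show extend_with_multiplied_combos_py input_combos multi_inputs
      = extend_with_multiplied_combos_py_alt input_combos multi_inputs
  unfold extend_with_multiplied_combos_py extend_with_multiplied_combos_py_alt
  have h1 : (fun (combos : List (List (String × String))) (kv : String × List String) =>
      combos.foldl
        (fun iter_combos combo =>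
          kv.2.foldl (fun iter_combos input_value => iter_combos ++ [pyCopyAndExtendInputs combo kv.1 input_value]) iter_combos)
        [])
      = fun combos kv => combos.flatMap (stepA kv) := by
    funext combos kv; exact inner_loops_eq kv combos
  rw [h1, fold_flatMap_distrib]
  apply List.flatMap_congr
  intro c hc
  have hcn : (c.map Prod.fst).Nodup := hic c hc
  have hk : (PySem.Dict.mk c : PySem.Dict String String).keys.Nodup := by
    simpa [PySem.Dict.keys] using hcn
  have := per_dict_eq multi_inputs (PySem.Dict.mk c) hk
  rw [show [c] = [(PySem.Dict.mk c : PySem.Dict String String).items] from rfl, this,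
    ofList_of_nodup c hcn]
  rfl
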